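-- pv_equiv track=rewrite | github.com/Bali-Gabor/PY241218 | moduls.py | legkisebb
-- ===== SOURCE A (Python) =====
-- def legkisebb(lista:list)->int:
--     index=0
--     for x in range(1,len(lista)):
--         if lista[index]>lista[x]: index=x
--     darab=0
--     for x in lista:
--         if x == lista[index]: darab+=1
--     return lista[index], darab
-- ===== SOURCE B (Python) =====
-- def legkisebb(lista: list) -> int:
--     m = lista[0]
--     c = 1
--     for x in lista[1:]:
--         if x < m:
--             m = x
--             c = 1
--         elif x == m:
--             c += 1
--     return m, c
-- ===== Notes on version B (the rewrite author's own statement) =====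
-- stated objective: alternative
-- what changed: A makes two passes (an index-based scan for the minimum's position, then a second scan counting it); B makes one value-based pass maintaining the running minimum and its tally simultaneously.
import Mathlib
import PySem

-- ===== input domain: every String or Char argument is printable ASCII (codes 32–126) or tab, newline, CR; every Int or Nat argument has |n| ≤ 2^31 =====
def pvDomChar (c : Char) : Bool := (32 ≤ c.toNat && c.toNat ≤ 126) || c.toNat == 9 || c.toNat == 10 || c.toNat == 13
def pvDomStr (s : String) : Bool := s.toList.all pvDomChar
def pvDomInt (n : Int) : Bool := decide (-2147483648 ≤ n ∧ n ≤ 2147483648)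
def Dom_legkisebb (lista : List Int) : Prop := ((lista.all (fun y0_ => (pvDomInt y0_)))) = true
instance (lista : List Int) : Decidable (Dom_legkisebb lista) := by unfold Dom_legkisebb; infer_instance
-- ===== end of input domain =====

-- B fuses A's two passes (min-index scan, then a counting scan) into one value-based pass
-- maintaining the running minimum and its tally; same return value, no speed claim.
-- Both programs raise IndexError on the empty list (Pre_ excludes it).

-- ===== PORT A =====
-- Inside the loops index/x are always in range for a nonempty list, so pyGetD is exact there;
-- the final lista[index] on an empty list raises IndexError — excluded by Pre_legkisebb.
def legkisebb (lista : List Int) : Int × Int :=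
  let index : Int :=
    (PySem.List.pyRange 1 lista.length 1).foldl
      (fun index x =>
        if PySem.List.pyGetD lista index 0 > PySem.List.pyGetD lista x 0 then x else index) 0
  let darab : Int :=
    lista.foldl (fun darab x => if x == PySem.List.pyGetD lista index 0 then darab + 1 else darab) 0
  (PySem.List.pyGetD lista index 0, darab)

-- ===== PORT B =====
-- the single pass of Source B: state (m, c) over the tail of the list
def legkisebbLoop : List Int → Int → Int → Int × Int
  | [], m, c => (m, c)
  | x :: t, m, c =>
    if x < m then legkisebbLoop t x 1
    else if x = m then legkisebbLoop t m (c + 1)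
    else legkisebbLoop t m c

def legkisebb_alt (lista : List Int) : Int × Int :=
  match lista with
  | [] => (0, 0)   -- unreachable: Python B raises IndexError on [], excluded by Pre_legkisebb
  | h :: t => legkisebbLoop t h 1

-- ===== PRECONDITION & SPEC =====
-- Pre_ excludes only the empty list, on which both Pythons raise IndexError.
def Pre_legkisebb (lista : List Int) : Prop := lista ≠ []
instance (lista : List Int) : Decidable (Pre_legkisebb lista) := by unfold Pre_legkisebb; infer_instance
def pvWitness_legkisebb : List Int := [3, 1, 2, 1]

def Spec_legkisebb (lista : List Int) (out : Int × Int) : Prop := out = legkisebb_alt lista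
instance (lista : List Int) (out : Int × Int) : Decidable (Spec_legkisebb lista out) := by unfold Spec_legkisebb; infer_instance

-- ===== CLAIM (what is proved, stated in full; the proofs are below) =====
def Claim_equal_legkisebb : Prop := ∀ (lista : List Int), Dom_legkisebb lista → Pre_legkisebb lista → Spec_legkisebb lista (legkisebb lista)

-- ===== LEMMAS AND PROOFS =====

theorem foldl_min_le_init (t : List Int) (m : Int) : t.foldl min m ≤ m := by
  induction t generalizing m with
  | nil => simp
  | cons x t ih =>
    simpa using le_trans (ih (min m x)) (min_le_left m x)

-- B's loop computes (minimum of m::t, count of that minimum in m::t weighted by c at m)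
theorem legkisebbLoop_eq (t : List Int) (m c : Int) :
    legkisebbLoop t m c =
      (t.foldl min m,
       (if t.foldl min m = m then c else 0) + ((t.count (t.foldl min m) : Nat) : Int)) := by
  induction t generalizing m c with
  | nil => simp [legkisebbLoop]
  | cons x t ih =>
    simp only [legkisebbLoop, List.foldl_cons]
    by_cases hx : x < m
    · rw [if_pos hx, ih]
      have hmin : min m x = x := min_eq_right hx.le
      have hle : t.foldl min x ≤ x := foldl_min_le_init t x
      have hne : t.foldl min (min m x) ≠ m := by rw [hmin]; omega
      simp only [hmin] at hne ⊢
      rw [if_neg hne]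
      rcases eq_or_ne (t.foldl min x) x with h | h
      · simp [h]; ring
      · simp [if_neg h, List.count_cons, if_neg (fun hh : x = t.foldl min x => h hh.symm)]
    · rw [if_neg hx]
      have hmin : min m x = m := min_eq_left (by omega)
      by_cases he : x = m
      · rw [if_pos he, ih]
        simp only [hmin]
        rcases eq_or_ne (t.foldl min m) m with h | h
        · simp [h, he]; ring
        · have : x ≠ t.foldl min m := by rw [he]; exact fun hh => h hh.symm
          simp [if_neg h, List.count_cons, if_neg this]
      · rw [if_neg he, ih]
        simp only [hmin]
        have hlt : t.foldl min m ≤ m := foldl_min_le_init t m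
        have : x ≠ t.foldl min m := by
          intro hh; apply he; omega
        simp [List.count_cons, if_neg this]

-- value of the minimum of a nonempty list, in B's shape
def minHead : List Int → Int
  | [] => 0
  | h :: t => t.foldl min h

theorem minHead_append_singleton (l : List Int) (hl : l ≠ []) (a : Int) :
    minHead (l ++ [a]) = min (minHead l) a := by
  cases l with
  | nil => exact absurd rfl hl
  | cons h t => simp [minHead, List.foldl_append]

-- A's first loop: its result r is a valid index and lista[r] is the minimum of the first n elements
theorem legkisebb_index_inv (l : List Int) (n : Nat) (h1 : 1 ≤ n) (hn : n ≤ l.length) :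
    ∃ r : Int,
      (PySem.List.pyRange 1 (n : Int) 1).foldl
        (fun index x =>
          if PySem.List.pyGetD l index 0 > PySem.List.pyGetD l x 0 then x else index) 0 = r ∧
      0 ≤ r ∧ r.toNat < n ∧ PySem.List.pyGetD l r 0 = minHead (l.take n) := by
  induction n with
  | zero => omega
  | succ n ih =>
    rcases Nat.eq_or_lt_of_le h1 with h | h
    · -- n + 1 = 1
      refine ⟨0, ?_, le_refl _, by omega, ?_⟩
      · rw [PySem.List.pyRange_one_eq_nil (show ((n + 1 : Nat) : Int) ≤ 1 by omega)]
        rfl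
      · obtain ⟨x, t, rfl⟩ : ∃ x t, l = x :: t := by
          cases l with
          | nil => simp at hn
          | cons x t => exact ⟨x, t, rfl⟩
        have hn1 : (n : Nat) = 0 := by omega
        simp [hn1, minHead, PySem.List.pyGetD_zero_cons]
    · -- n ≥ 1
      have h1n : 1 ≤ n := by omega
      obtain ⟨r, hr, hr0, hrn, hrv⟩ := ih h1n (by omega)
      have hsplit : PySem.List.pyRange 1 ((n + 1 : Nat) : Int) 1 =
          PySem.List.pyRange 1 (n : Int) 1 ++ [(n : Int)] := by
        have hc : ((n + 1 : Nat) : Int) = ((n : Nat) : Int) + 1 := by push_cast; ring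
        rw [hc]
        exact PySem.List.pyRange_one_succ_right (by omega)
      rw [hsplit, List.foldl_append, hr]
      simp only [List.foldl_cons, List.foldl_nil]
      have hnlen : (n : Nat) < l.length := by omega
      have hgn : PySem.List.pyGetD l (n : Int) 0 = l[(n : Nat)] :=
        PySem.List.pyGetD_ofNat l n 0 hnlen
      have htake : l.take (n + 1) = l.take n ++ [l[(n : Nat)]] := by
        rw [List.take_add_one]
        simp [List.getElem?_eq_getElem hnlen]
      have htne : l.take n ≠ [] := by
        have hlen : (l.take n).length = n := by
          rw [List.length_take]
          omega
        intro hh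
        rw [hh] at hlen
        simp at hlen
        omega
      rw [htake, minHead_append_singleton _ htne]
      by_cases hc : PySem.List.pyGetD l r 0 > PySem.List.pyGetD l (n : Int) 0
      · refine ⟨(n : Int), by rw [if_pos hc], by omega, by omega, ?_⟩
        rw [hgn] at hc ⊢
        rw [hrv] at hc
        exact (min_eq_right hc.le).symm
      · refine ⟨r, by rw [if_neg hc], hr0, by omega, ?_⟩
        rw [hgn, hrv] at hc
        rw [hrv]
        exact (min_eq_left (not_lt.mp hc)).symm

-- (h :: t).count, cast to Int, in the shape produced by legkisebbLoop_eq
theorem count_cons_int (h x : Int) (t : List Int) :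
    (((h :: t).count x : Nat) : Int) = (if x = h then 1 else 0) + ((t.count x : Nat) : Int) := by
  rcases eq_or_ne x h with rfl | hne
  · simp
    ring
  · simp [List.count_cons, hne, if_neg (fun hh : h = x => hne hh.symm)]

-- ===== VERDICT (by name: the statement is the Claim_ definition above) =====
theorem legkisebb_spec : Claim_equal_legkisebb := by
  intro lista _ hpre
  cases lista with
  | nil => exact absurd rfl hpre
  | cons h t =>
    unfold Spec_legkisebb legkisebb legkisebb_alt
    obtain ⟨r, hr, hr0, hrn, hrv⟩ :=
      legkisebb_index_inv (h :: t) (h :: t).length (by simp) (le_refl _)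
    rw [List.take_length] at hrv
    simp only [hr, hrv]
    rw [PySem.List.foldl_beq_add_one]
    rw [legkisebbLoop_eq]
    have hmh : minHead (h :: t) = t.foldl min h := rfl
    rw [hmh]
    refine Prod.ext rfl ?_
    simp only [zero_add]
    rw [count_cons_int]
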